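-- pv_equiv track=rewrite | github.com/Ca-moes/FPRO | RE06/count.py | count
-- ===== SOURCE A (Python) =====
-- def count(word, phrase):
--
--     counter = 0
--     phraselist = phrase.split()
--     word = word.lower()
--     for palavra in phraselist:
--         if palavra == word:
--             counter += 1
--
--     for i in range(len(word)):
--         i += 1
--         for n in range(len(word) - (i - 1)):
--             test = word[n:i].capitalize()
--             for palavra in phraselist:
--                 if test == palavra:
--                     counter += 1
--     return counter
-- ===== SOURCE B (Python) =====
-- def count(word, phrase):
--     word = word.lower()
--     cand = {}
--     cand[word] = cand.get(word, 0) + 1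
--     L = len(word)
--     for i in range(1, L + 1):
--         for n in range(L - i + 1):
--             key = word[n:i].capitalize()
--             cand[key] = cand.get(key, 0) + 1
--     total = 0
--     for palavra in phrase.split():
--         total += cand.get(palavra, 0)
--     return total
-- ===== Notes on version B (the rewrite author's own statement) =====
-- stated objective: alternative
-- what changed: B builds a dict counting each candidate string (the lowercased word plus every capitalized substring) once, then scans the phrase words a single time summing table lookups, instead of A's rescan of the whole phrase list for every generated substring.
import Mathlib
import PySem

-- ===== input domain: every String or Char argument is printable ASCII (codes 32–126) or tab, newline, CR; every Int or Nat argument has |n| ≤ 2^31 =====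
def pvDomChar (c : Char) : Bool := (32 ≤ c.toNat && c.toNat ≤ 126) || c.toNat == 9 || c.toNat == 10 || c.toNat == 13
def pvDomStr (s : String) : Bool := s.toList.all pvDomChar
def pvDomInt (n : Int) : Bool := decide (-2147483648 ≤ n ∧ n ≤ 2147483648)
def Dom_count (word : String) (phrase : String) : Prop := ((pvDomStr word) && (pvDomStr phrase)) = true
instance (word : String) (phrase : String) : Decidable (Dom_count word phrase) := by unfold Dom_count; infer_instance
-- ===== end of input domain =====

-- B builds a counter of the candidate strings once and then scans the phrase a single time,
-- instead of A's rescan of the whole phrase for every generated substring.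

-- str.capitalize(): first char upper-cased, rest lower-cased; exact on the ASCII domain
-- (Python title-cases the first char, which on ASCII coincides with upper-casing).
def pyCapitalize (s : List Char) : List Char :=
  match s with
  | [] => []
  | c :: cs => PySem.Chars.upperChar c :: PySem.Chars.lower cs

-- ===== PORT A =====
def count (word : String) (phrase : String) : Int :=
  let counter : Int := 0
  let phraselist := (PySem.Str.split₀ phrase).map String.toList
  let w := (PySem.Str.lower word).toList
  let counter := phraselist.foldl (fun c palavra => if palavra == w then c + 1 else c) counter
  let counter := (PySem.List.pyRange 0 (w.length : Int) 1).foldl (fun c i0 =>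
      let i := i0 + 1
      (PySem.List.pyRange 0 ((w.length : Int) - (i - 1)) 1).foldl (fun c n =>
        let test := pyCapitalize (PySem.List.slice w (some n) (some i))
        phraselist.foldl (fun c palavra => if test == palavra then c + 1 else c) c) c) counter
  counter

-- ===== PORT B =====
def count_alt (word : String) (phrase : String) : Int :=
  let w := (PySem.Str.lower word).toList
  let cand : PySem.Dict (List Char) Int := PySem.Dict.empty.insert w (PySem.Dict.empty.getD w 0 + 1)
  let L := w.length
  let cand := (PySem.List.pyRange 1 ((L : Int) + 1) 1).foldl (fun d i =>
      (PySem.List.pyRange 0 ((L : Int) - i + 1) 1).foldl (fun d n =>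
        let key := pyCapitalize (PySem.List.slice w (some n) (some i))
        d.insert key (d.getD key 0 + 1)) d) cand
  (PySem.Str.split₀ phrase).foldl (fun total palavra => total + cand.getD palavra.toList 0) 0

-- ===== PRECONDITION & SPEC =====
def Spec_count (word : String) (phrase : String) (out : Int) : Prop := out = count_alt word phrase
instance (word : String) (phrase : String) (out : Int) : Decidable (Spec_count word phrase out) := by unfold Spec_count; infer_instance

-- ===== CLAIM (what is proved, stated in full; the proofs are below) =====
def Claim_equal_count : Prop := ∀ (word : String) (phrase : String), Dom_count word phrase → Spec_count word phrase (count word phrase)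

-- ===== LEMMAS AND PROOFS =====

-- the flattened list of candidate substrings (B's loop order; also A's after the index shift)
def keysFlat (w : List Char) : List (List Char) :=
  (PySem.List.pyRange 1 ((w.length : Int) + 1) 1).flatMap (fun i =>
    (PySem.List.pyRange 0 ((w.length : Int) - i + 1) 1).map (fun n =>
      pyCapitalize (PySem.List.slice w (some n) (some i))))

-- nested loop = single loop over the flattened list
theorem foldl_nested {α β σ : Type} (l : List α) (g : α → List β) (f : σ → β → σ) (s : σ) :
    l.foldl (fun s x => (g x).foldl f s) s = (l.flatMap g).foldl f s := by
  induction l generalizing s with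
  | nil => rfl
  | cons a t ih => simp [List.flatMap_cons, List.foldl_append, ih]

theorem sum_flatMap_map {α β : Type} (l : List α) (g : α → List β) (f : β → Int) :
    ((l.flatMap g).map f).sum = (l.map (fun x => ((g x).map f).sum)).sum := by
  induction l with
  | nil => rfl
  | cons a t ih => simp [List.flatMap_cons, ih]

theorem count_aux {α : Type} [BEq α] [LawfulBEq α] (ps : List α) (k : α) :
    (ps.map (fun p => if k == p then (1 : Nat) else 0)).sum = ps.count k := by
  induction ps with
  | nil => simp
  | cons p t ih =>
    simp only [List.map_cons, List.sum_cons, List.count_cons, ih]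
    by_cases h : k = p
    · simp [h]; omega
    · simp [h]; exact fun e => h e.symm

-- double counting: Σ_{k∈keys} ps.count k = Σ_{p∈ps} keys.count p
theorem double_count {α : Type} [BEq α] [LawfulBEq α] (keys ps : List α) :
    (keys.map (fun k => ps.count k)).sum = (ps.map (fun p => keys.count p)).sum := by
  induction keys with
  | nil => simp
  | cons k t ih =>
    simp only [List.map_cons, List.sum_cons, ih, List.count_cons]
    rw [List.sum_map_add]
    have := count_aux ps k
    omega

theorem sum_map_natCast {α : Type} (l : List α) (f : α → Nat) :
    (l.map (fun x => ((f x : Nat) : Int))).sum = ((l.map f).sum : Nat) := by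
  induction l with
  | nil => rfl
  | cons a t ih => simp [ih]

-- range(1, L+1) is range(L) shifted by one
theorem rangeB (L : Nat) :
    PySem.List.pyRange 1 ((L : Int) + 1) 1 = (PySem.List.pyRange 0 (L : Int) 1).map (fun x => x + 1) := by
  rw [PySem.List.pyRange_of_pos _ _ (by norm_num)]
  rw [show PySem.List.pyRange 0 (L:Int) 1 = PySem.List.pyRange 0 (L:Int) from rfl]
  rw [PySem.List.pyRange_zero_natCast]
  have h1 : (if (1:Int) < (L:Int) + 1 then (((L:Int) + 1 - 1 + 1 - 1) / 1).toNat else 0) = L := by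
    split <;> omega
  rw [h1, List.map_map]
  apply List.map_congr_left
  intro k _
  simp; ring

-- B's value = Σ_{p∈phrase} (w :: keysFlat w).count p
theorem B_eval (word phrase : String) :
    count_alt word phrase =
      (((PySem.Str.split₀ phrase).map String.toList).map
        (fun p => (((( (PySem.Str.lower word).toList) :: keysFlat ((PySem.Str.lower word).toList)).count p : Nat) : Int))).sum := by
  unfold count_alt
  simp only []
  set w := (PySem.Str.lower word).toList with hw
  have hcand : (PySem.List.pyRange 1 ((w.length : Int) + 1) 1).foldl (fun d i =>
      (PySem.List.pyRange 0 ((w.length : Int) - i + 1) 1).foldl (fun d n =>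
        let key := pyCapitalize (PySem.List.slice w (some n) (some i))
        d.insert key (d.getD key 0 + 1)) d)
      (PySem.Dict.empty.insert w (PySem.Dict.empty.getD w 0 + 1))
      = PySem.Dict.counter (w :: keysFlat w) := by
    have hstep : (fun (d : PySem.Dict (List Char) Int) (i : Int) =>
          (PySem.List.pyRange 0 ((w.length : Int) - i + 1) 1).foldl (fun d n =>
            let key := pyCapitalize (PySem.List.slice w (some n) (some i))
            d.insert key (d.getD key 0 + 1)) d)
        = (fun (d : PySem.Dict (List Char) Int) (i : Int) =>
          ((PySem.List.pyRange 0 ((w.length : Int) - i + 1) 1).map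
            (fun n => pyCapitalize (PySem.List.slice w (some n) (some i)))).foldl
            (fun d key => d.insert key (d.getD key 0 + 1)) d) := by
      funext d i; rw [List.foldl_map]
    rw [hstep, foldl_nested]
    rw [show PySem.Dict.empty.insert w ((PySem.Dict.empty : PySem.Dict (List Char) Int).getD w 0 + 1)
        = (fun (d : PySem.Dict (List Char) Int) key => d.insert key (d.getD key 0 + 1)) PySem.Dict.empty w from rfl]
    rw [← List.foldl_cons]
    exact PySem.Dict.foldl_insert_getD_add_one_eq_counter _
  rw [hcand]
  have hfin : ((PySem.Str.split₀ phrase).map String.toList).foldl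
        (fun total p => total + (PySem.Dict.counter (w :: keysFlat w)).getD p 0) 0
      = (PySem.Str.split₀ phrase).foldl
        (fun total palavra => total + (PySem.Dict.counter (w :: keysFlat w)).getD palavra.toList 0) 0 := by
    rw [List.foldl_map]
  rw [← hfin, PySem.List.foldl_add]
  simp [PySem.Dict.getD_counter]

-- A's value = ps.count w + Σ_{k∈keysFlat} ps.count k
theorem A_eval (word phrase : String) :
    count word phrase =
      ((((PySem.Str.split₀ phrase).map String.toList).count ((PySem.Str.lower word).toList) : Nat) : Int) +
      ((keysFlat ((PySem.Str.lower word).toList)).map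
        (fun k => ((((PySem.Str.split₀ phrase).map String.toList).count k : Nat) : Int))).sum := by
  unfold count
  simp only []
  set w := (PySem.Str.lower word).toList with hw
  set ps := (PySem.Str.split₀ phrase).map String.toList with hps
  -- exact-match loop
  rw [PySem.List.foldl_count_if (fun palavra => palavra == w) ps 0]
  have hc1 : ps.countP (fun palavra => palavra == w) = ps.count w := rfl
  -- innermost phrase loop counts
  have hin : ∀ (test : List Char) (c : Int),
      ps.foldl (fun c palavra => if test == palavra then c + 1 else c) c = c + (ps.count test : Nat) := by
    intro test c
    rw [PySem.List.foldl_count_if (fun palavra => test == palavra) ps c]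
    congr 1
    norm_cast
    apply List.countP_congr
    intro p _
    rw [BEq.comm (a := test) (b := p)]
  have houter : (fun (c : Int) (i0 : Int) =>
        (PySem.List.pyRange 0 ((w.length : Int) - (i0 + 1 - 1)) 1).foldl (fun c n =>
          ps.foldl (fun c palavra =>
            if pyCapitalize (PySem.List.slice w (some n) (some (i0 + 1))) == palavra then c + 1 else c) c) c)
      = (fun (c : Int) (i0 : Int) =>
        c + ((PySem.List.pyRange 0 ((w.length : Int) - (i0 + 1 - 1)) 1).map
          (fun n => ((ps.count (pyCapitalize (PySem.List.slice w (some n) (some (i0 + 1)))) : Nat) : Int))).sum) := by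
    funext c i0
    have hbody : (fun (c : Int) (n : Int) =>
        ps.foldl (fun c palavra =>
          if pyCapitalize (PySem.List.slice w (some n) (some (i0 + 1))) == palavra then c + 1 else c) c)
        = (fun (c : Int) (n : Int) =>
          c + ((ps.count (pyCapitalize (PySem.List.slice w (some n) (some (i0 + 1)))) : Nat) : Int)) := by
      funext c n
      exact hin _ c
    rw [hbody, PySem.List.foldl_add]
  rw [houter]
  rw [PySem.List.foldl_add (PySem.List.pyRange 0 ((w.length : Int)) 1)
    (fun i0 => ((PySem.List.pyRange 0 ((w.length : Int) - (i0 + 1 - 1)) 1).map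
      (fun n => ((ps.count (pyCapitalize (PySem.List.slice w (some n) (some (i0 + 1)))) : Nat) : Int))).sum)
    (0 + ((ps.countP (fun palavra => palavra == w) : Nat) : Int)), hc1]
  have hsum : ((keysFlat w).map (fun k => ((ps.count k : Nat) : Int))).sum
      = ((PySem.List.pyRange 0 ((w.length : Int)) 1).map
        (fun i0 => ((PySem.List.pyRange 0 ((w.length : Int) - (i0 + 1 - 1)) 1).map
          (fun n => ((ps.count (pyCapitalize (PySem.List.slice w (some n) (some (i0 + 1)))) : Nat) : Int))).sum)).sum := by
    rw [keysFlat, sum_flatMap_map, rangeB, List.map_map]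
    refine congrArg List.sum ?_
    apply List.map_congr_left
    intro i0 _
    simp only [Function.comp_apply]
    rw [List.map_map]
    have hb : (w.length : Int) - (i0 + 1) + 1 = (w.length : Int) - (i0 + 1 - 1) := by ring
    rw [hb]
    rfl
  rw [hsum]
  ring


theorem count_eq (word phrase : String) : count word phrase = count_alt word phrase := by
  rw [A_eval, B_eval]
  set w := (PySem.Str.lower word).toList
  set ps := (PySem.Str.split₀ phrase).map String.toList
  rw [sum_map_natCast, sum_map_natCast]
  rw [← double_count (w :: keysFlat w) ps]
  simp only [List.map_cons, List.sum_cons]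
  push_cast
  ring

-- ===== VERDICT (by name: the statement is the Claim_ definition above) =====
theorem count_spec : Claim_equal_count := by
  intro word phrase _
  unfold Spec_count
  exact count_eq word phrase
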